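-- pv_equiv track=rewrite | github.com/yinanwang1/LearnPython | LeetCode/LeetCode9/repeatedCharacter.py | repeatedCharacter
-- ===== SOURCE A (Python) =====
-- def repeatedCharacter(s: str) -> str:
--     charMap = dict()
--     for c in s:
--         d = charMap.get(c, 0)
--         if d >= 2:
--             return c
--         charMap[c] = d + 1
--
--     return ""
-- ===== SOURCE B (Python) =====
-- def repeatedCharacter(s: str) -> str:
--     # For each distinct character, find the index of its third occurrence;
--     # answer is the character whose third occurrence comes earliest.
--     best = None  # (index of third occurrence, char)
--     for c in dict.fromkeys(s):
--         idxs = [i for i, ch in enumerate(s) if ch == c]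
--         if len(idxs) >= 3 and (best is None or idxs[2] < best[0]):
--             best = (idxs[2], c)
--     return best[1] if best is not None else ""
-- ===== Notes on version B (the rewrite author's own statement) =====
-- stated objective: alternative
-- what changed: Replaced A's single left-to-right counting scan with early return by a per-distinct-character computation: for each distinct character collect its occurrence indices, take the third one if it exists, and return the character whose third occurrence index is minimal (empty string if none).
import Mathlib
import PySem

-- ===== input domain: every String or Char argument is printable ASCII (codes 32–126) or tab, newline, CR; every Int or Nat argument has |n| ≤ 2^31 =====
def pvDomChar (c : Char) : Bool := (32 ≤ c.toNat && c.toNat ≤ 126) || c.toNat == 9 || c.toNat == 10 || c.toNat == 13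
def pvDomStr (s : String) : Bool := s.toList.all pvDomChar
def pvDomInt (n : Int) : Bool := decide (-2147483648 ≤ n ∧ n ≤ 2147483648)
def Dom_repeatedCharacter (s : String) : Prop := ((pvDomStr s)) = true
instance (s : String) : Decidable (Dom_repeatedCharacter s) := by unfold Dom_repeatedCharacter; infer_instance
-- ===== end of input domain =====

-- B replaces A's single counting scan with an index-minimization over distinct characters
-- (third-occurrence index per character, then the minimum); objective: alternative algorithm, not faster.

-- ===== PORT A =====
-- the for-loop with early return, as structural recursion over the characters with the dict as state
def repAux : List Char → PySem.Dict Char Int → String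
  | [], _ => ""
  | c :: rest, m =>
      let d := m.getD c 0
      if 2 ≤ d then String.ofList [c]
      else repAux rest (m.insert c (d + 1))

def repeatedCharacter (s : String) : String := repAux s.toList PySem.Dict.empty

-- ===== PORT B =====
-- [i for i, ch in enumerate(s) if ch == c] : occurrence indices of c, hand-ported with explicit counter
def occIdxs (c : Char) : List Char → Nat → List Nat
  | [], _ => []
  | ch :: rest, k => (if ch == c then [k] else []) ++ occIdxs c rest (k + 1)

-- loop body: update best with c's third-occurrence index (len(idxs) >= 3 and idxs[2] < best[0])
def bestStep (l : List Char) (best : Option (Nat × Char)) (c : Char) : Option (Nat × Char) :=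
  match (occIdxs c l 0)[2]? with
  | none => best
  | some i =>
      match best with
      | none => some (i, c)
      | some b => if i < b.1 then some (i, c) else best

def repeatedCharacter_alt (s : String) : String :=
  match (PySem.List.dedup s.toList).foldl (bestStep s.toList) none with
  | some b => String.ofList [b.2]
  | none => ""

-- ===== PRECONDITION & SPEC =====
def Spec_repeatedCharacter (s : String) (out : String) : Prop := out = repeatedCharacter_alt s
instance (s : String) (out : String) : Decidable (Spec_repeatedCharacter s out) := by unfold Spec_repeatedCharacter; infer_instance

-- ===== CLAIM (what is proved, stated in full; the proofs are below) =====
def Claim_equal_repeatedCharacter : Prop := ∀ (s : String), Dom_repeatedCharacter s → Spec_repeatedCharacter s (repeatedCharacter s)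

-- ===== LEMMAS AND PROOFS =====

theorem bestStep_occ_none (l : List Char) (b : Option (Nat × Char)) (c : Char)
    (h : (occIdxs c l 0)[2]? = none) : bestStep l b c = b := by
  unfold bestStep
  rw [h]

theorem bestStep_occ_some_none (l : List Char) (c : Char) (i : Nat)
    (h : (occIdxs c l 0)[2]? = some i) : bestStep l none c = some (i, c) := by
  unfold bestStep
  rw [h]

theorem bestStep_occ_some_some (l : List Char) (c : Char) (i : Nat) (b : Nat × Char)
    (h : (occIdxs c l 0)[2]? = some i) :
    bestStep l (some b) c = if i < b.1 then some (i, c) else some b := by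
  unfold bestStep
  rw [h]

-- A's scan with the processed prefix made explicit (count in prefix replaces the dict)
def ft : List Char → List Char → Option Char
  | _, [] => none
  | p, c :: rest => if 2 ≤ p.count c then some c else ft (p ++ [c]) rest

-- all positions (with running index k) at which a character reaches exactly its third occurrence
def tripsI : List Char → Nat → List Char → List (Nat × Char)
  | _, _, [] => []
  | p, k, c :: rest => (if p.count c = 2 then [(k, c)] else []) ++ tripsI (p ++ [c]) (k + 1) rest

theorem repAux_eq_ft (l : List Char) : ∀ (p : List Char) (m : PySem.Dict Char Int),
    (∀ c, m.getD c 0 = (p.count c : Int)) →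
    repAux l m = (match ft p l with | some c => String.ofList [c] | none => "") := by
  induction l with
  | nil => intro p m _; rfl
  | cons c rest ih =>
    intro p m h
    have hd := h c
    simp only [repAux, ft]
    by_cases hc : 2 ≤ p.count c
    · have h2 : (2 : Int) ≤ m.getD c 0 := by rw [hd]; exact_mod_cast hc
      rw [if_pos h2, if_pos hc]
    · have h2 : ¬ (2 : Int) ≤ m.getD c 0 := by rw [hd]; exact_mod_cast hc
      rw [if_neg h2, if_neg hc]
      apply ih
      intro c'
      rw [PySem.Dict.getD_insert]
      by_cases hcc : c' = c
      · subst hcc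
        rw [if_pos rfl, hd, List.count_append]
        have h1 : ∀ x : Char, List.count x [x] = 1 := fun x => by simp
        rw [h1]
        push_cast
        ring
      · rw [if_neg hcc, h c', List.count_append]
        have h1 : List.count c' [c] = 0 := List.count_eq_zero.mpr (by simp [hcc])
        rw [h1]
        norm_num

theorem ft_eq_head_tripsI (l : List Char) : ∀ (p : List Char) (k : Nat),
    (∀ c, p.count c ≤ 2) → ft p l = ((tripsI p k l).map Prod.snd).head? := by
  induction l with
  | nil => intro p k _; rfl
  | cons c rest ih =>
    intro p k h
    simp only [ft, tripsI]
    by_cases hc : 2 ≤ p.count c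
    · have he : p.count c = 2 := le_antisymm (h c) hc
      rw [if_pos hc, if_pos he]
      rfl
    · have hne : ¬ p.count c = 2 := by omega
      rw [if_neg hc, if_neg hne, List.nil_append]
      apply ih
      intro c'
      rw [List.count_append]
      by_cases hcc : c' = c
      · subst hcc
        have h1 : ∀ x : Char, List.count x [x] = 1 := fun x => by simp
        rw [h1]
        omega
      · have h1 : List.count c' [c] = 0 := List.count_eq_zero.mpr (by simp [hcc])
        rw [h1]
        simpa using h c'

theorem mem_tripsI (l : List Char) : ∀ (p : List Char) (k i : Nat) (c : Char),
    (i, c) ∈ tripsI p k l ↔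
      ∃ j, j < l.length ∧ i = k + j ∧ l[j]? = some c ∧ (p ++ l.take j).count c = 2 := by
  induction l with
  | nil => intro p k i c; simp [tripsI]
  | cons ch rest ih =>
    intro p k i c
    simp only [tripsI, List.mem_append]
    constructor
    · rintro (hmem | hmem)
      · by_cases h2 : p.count ch = 2
        · rw [if_pos h2] at hmem
          simp only [List.mem_singleton, Prod.mk.injEq] at hmem
          obtain ⟨hi, hc⟩ := hmem
          subst hi; subst hc
          exact ⟨0, by simp, by omega, by simp, by simpa using h2⟩
        · rw [if_neg h2] at hmem
          simp at hmem
      · obtain ⟨j, hj, hi, hget, hcnt⟩ := (ih (p ++ [ch]) (k + 1) i c).1 hmem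
        refine ⟨j + 1, by simpa using hj, by omega, by simpa using hget, ?_⟩
        rw [List.take_succ_cons, List.append_cons]
        exact hcnt
    · rintro ⟨j, hj, hi, hget, hcnt⟩
      cases j with
      | zero =>
        left
        simp only [List.getElem?_cons_zero, Option.some.injEq] at hget
        subst hget
        simp only [List.take_zero, List.append_nil] at hcnt
        rw [if_pos hcnt]
        simp only [List.mem_singleton, Prod.mk.injEq]
        exact ⟨by omega, trivial⟩
      | succ j' =>
        right
        apply (ih (p ++ [ch]) (k + 1) i c).2
        refine ⟨j', by simpa using hj, by omega, by simpa using hget, ?_⟩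
        rw [List.take_succ_cons, List.append_cons] at hcnt
        exact hcnt

theorem occIdxs_getElem (l : List Char) : ∀ (c : Char) (k n i : Nat),
    (occIdxs c l k)[n]? = some i ↔
      ∃ j, j < l.length ∧ i = k + j ∧ l[j]? = some c ∧ (l.take j).count c = n := by
  induction l with
  | nil => intro c k n i; simp [occIdxs]
  | cons ch rest ih =>
    intro c k n i
    by_cases hch : ch = c
    · subst hch
      simp only [occIdxs, if_pos (by simp : (ch == ch) = true), List.singleton_append]
      cases n with
      | zero =>
        simp only [List.getElem?_cons_zero, Option.some.injEq]
        constructor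
        · rintro rfl
          exact ⟨0, by simp, by omega, by simp, by simp⟩
        · rintro ⟨j, hj, hi, hget, hcnt⟩
          cases j with
          | zero => omega
          | succ j' =>
            exfalso
            rw [List.take_succ_cons] at hcnt
            simp at hcnt
      | succ n' =>
        rw [List.getElem?_cons_succ, ih]
        constructor
        · rintro ⟨j', hj', hi, hget, hcnt⟩
          refine ⟨j' + 1, by simpa using hj', by omega, by simpa using hget, ?_⟩
          rw [List.take_succ_cons]
          simp [hcnt]
        · rintro ⟨j, hj, hi, hget, hcnt⟩
          cases j with
          | zero =>
            exfalso
            simp at hcnt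
          | succ j' =>
            rw [List.take_succ_cons] at hcnt
            simp at hcnt
            exact ⟨j', by simpa using hj, by omega, by simpa using hget, by omega⟩
    · have hbe : (ch == c) = false := by simp [hch]
      simp only [occIdxs, hbe, if_neg Bool.false_ne_true, List.nil_append]
      rw [ih]
      constructor
      · rintro ⟨j', hj', hi, hget, hcnt⟩
        refine ⟨j' + 1, by simpa using hj', by omega, by simpa using hget, ?_⟩
        rw [List.take_succ_cons]
        simp [hch, hcnt]
      · rintro ⟨j, hj, hi, hget, hcnt⟩
        cases j with
        | zero =>
          exfalso
          simp only [List.getElem?_cons_zero, Option.some.injEq] at hget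
          exact hch hget
        | succ j' =>
          rw [List.take_succ_cons] at hcnt
          simp [hch] at hcnt
          exact ⟨j', by simpa using hj, by omega, by simpa using hget, hcnt⟩

theorem mem_tripsI_iff_occ (l : List Char) (i : Nat) (c : Char) :
    (i, c) ∈ tripsI [] 0 l ↔ (occIdxs c l 0)[2]? = some i := by
  rw [mem_tripsI, occIdxs_getElem]
  simp

theorem tripsI_bound (l : List Char) : ∀ (p : List Char) (k : Nat) (q : Nat × Char),
    q ∈ tripsI p k l → k ≤ q.1 := by
  induction l with
  | nil => intro p k q hq; simp [tripsI] at hq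
  | cons c rest ih =>
    intro p k q hq
    simp only [tripsI, List.mem_append] at hq
    rcases hq with hq | hq
    · by_cases h2 : p.count c = 2
      · rw [if_pos h2] at hq
        simp only [List.mem_singleton] at hq
        subst hq
        exact le_refl _
      · rw [if_neg h2] at hq
        simp at hq
    · have := ih (p ++ [c]) (k + 1) q hq
      omega

theorem tripsI_pairwise (l : List Char) : ∀ (p : List Char) (k : Nat),
    (tripsI p k l).Pairwise (fun a b => a.1 < b.1) := by
  induction l with
  | nil => intro p k; simp [tripsI]
  | cons c rest ih =>
    intro p k
    simp only [tripsI]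
    by_cases h2 : p.count c = 2
    · rw [if_pos h2, List.singleton_append, List.pairwise_cons]
      refine ⟨fun q hq => ?_, ih (p ++ [c]) (k + 1)⟩
      have := tripsI_bound rest (p ++ [c]) (k + 1) q hq
      omega
    · rw [if_neg h2, List.nil_append]
      exact ih (p ++ [c]) (k + 1)

theorem foldl_bestStep_none (l : List Char) : ∀ (cs : List Char) (b : Option (Nat × Char)),
    (∀ c ∈ cs, (occIdxs c l 0)[2]? = none) → cs.foldl (bestStep l) b = b := by
  intro cs
  induction cs with
  | nil => intro b _; rfl
  | cons c rest ih =>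
    intro b h
    rw [List.foldl_cons]
    rw [bestStep_occ_none l b c (h c (List.mem_cons_self ..))]
    exact ih b (fun c' hc' => h c' (List.mem_cons_of_mem _ hc'))

theorem foldl_bestStep_keep (l : List Char) (i₀ : Nat) (c₀ : Char) :
    ∀ (cs : List Char), (∀ c ∈ cs, ∀ i, (occIdxs c l 0)[2]? = some i → i₀ ≤ i) →
    cs.foldl (bestStep l) (some (i₀, c₀)) = some (i₀, c₀) := by
  intro cs
  induction cs with
  | nil => intro _; rfl
  | cons c rest ih =>
    intro h
    rw [List.foldl_cons]
    have hstep : bestStep l (some (i₀, c₀)) c = some (i₀, c₀) := by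
      cases hocc : (occIdxs c l 0)[2]? with
      | none => exact bestStep_occ_none l _ c hocc
      | some i =>
        rw [bestStep_occ_some_some l c i _ hocc]
        have : i₀ ≤ i := h c (List.mem_cons_self ..) i hocc
        rw [if_neg (by simpa using by omega : ¬ i < (i₀, c₀).1)]
    rw [hstep]
    exact ih (fun c' hc' => h c' (List.mem_cons_of_mem _ hc'))

theorem foldl_bestStep_min (l : List Char) (i₀ : Nat) (c₀ : Char)
    (hocc : (occIdxs c₀ l 0)[2]? = some i₀)
    (hmin : ∀ c i, (occIdxs c l 0)[2]? = some i → i₀ < i ∨ (i = i₀ ∧ c = c₀)) :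
    ∀ (cs : List Char) (acc : Option (Nat × Char)), c₀ ∈ cs →
    (acc = none ∨ ∃ j d, acc = some (j, d) ∧ i₀ < j) →
    cs.foldl (bestStep l) acc = some (i₀, c₀) := by
  intro cs
  induction cs with
  | nil => intro acc hmem _; simp at hmem
  | cons c rest ih =>
    intro acc hmem hacc
    rw [List.foldl_cons]
    cases hocc2 : (occIdxs c l 0)[2]? with
    | none =>
      rw [bestStep_occ_none l acc c hocc2]
      have hne : c₀ ≠ c := fun h => by rw [h, hocc2] at hocc; cases hocc
      have hmem' : c₀ ∈ rest := by
        rcases List.mem_cons.1 hmem with h | h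
        · exact absurd h hne
        · exact h
      exact ih acc hmem' hacc
    | some i =>
      rcases hmin c i hocc2 with hlt | ⟨hi, hc⟩
      · -- c is not the winner; acc stays above i₀
        have hne : c₀ ≠ c := by
          intro h
          rw [← h, hocc] at hocc2
          injection hocc2 with hh
          omega
        have hmem' : c₀ ∈ rest := by
          rcases List.mem_cons.1 hmem with h | h
          · exact absurd h hne
          · exact h
        have hinv : bestStep l acc c = none ∨
            ∃ j d, bestStep l acc c = some (j, d) ∧ i₀ < j := by
          rcases hacc with rfl | ⟨j, d, rfl, hj⟩
          · rw [bestStep_occ_some_none l c i hocc2]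
            exact Or.inr ⟨i, c, rfl, hlt⟩
          · rw [bestStep_occ_some_some l c i _ hocc2]
            by_cases hij : i < (j, d).1
            · rw [if_pos hij]; exact Or.inr ⟨i, c, rfl, hlt⟩
            · rw [if_neg hij]; exact Or.inr ⟨j, d, rfl, hj⟩
        exact ih (bestStep l acc c) hmem' hinv
      · -- c = c₀ reaches the minimum: acc becomes (i₀, c₀) and stays
        subst hi; subst hc
        have hstep : bestStep l acc c = some (i, c) := by
          rcases hacc with rfl | ⟨j, d, rfl, hj⟩
          · exact bestStep_occ_some_none l c i hocc2
          · rw [bestStep_occ_some_some l c i _ hocc2]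
            rw [if_pos (by simpa using hj)]
        rw [hstep]
        apply foldl_bestStep_keep
        intro c' _ i' h'
        rcases hmin c' i' h' with h | ⟨h, _⟩
        · omega
        · omega

-- ===== VERDICT (by name: the statement is the Claim_ definition above) =====
theorem repeatedCharacter_spec : Claim_equal_repeatedCharacter := by
  intro s _
  unfold Spec_repeatedCharacter repeatedCharacter repeatedCharacter_alt
  have hA : repAux s.toList PySem.Dict.empty
      = (match ft [] s.toList with | some c => String.ofList [c] | none => "") := by
    apply repAux_eq_ft
    intro c
    simp [PySem.Dict.getD_empty]
  rw [hA]
  have hft : ft [] s.toList = ((tripsI [] 0 s.toList).map Prod.snd).head? :=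
    ft_eq_head_tripsI s.toList [] 0 (by intro c; simp)
  cases hT : tripsI [] 0 s.toList with
  | nil =>
    rw [hft, hT]
    have hall : ∀ c ∈ PySem.List.dedup s.toList, (occIdxs c s.toList 0)[2]? = none := by
      intro c _
      cases hocc : (occIdxs c s.toList 0)[2]? with
      | none => rfl
      | some i =>
        exfalso
        have := (mem_tripsI_iff_occ s.toList i c).2 hocc
        rw [hT] at this
        simp at this
    rw [foldl_bestStep_none s.toList _ none hall]
    rfl
  | cons q rest =>
    obtain ⟨i₀, c₀⟩ := q
    rw [hft, hT]
    have hq : (i₀, c₀) ∈ tripsI [] 0 s.toList := by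
      rw [hT]; exact List.mem_cons_self ..
    have hocc : (occIdxs c₀ s.toList 0)[2]? = some i₀ := (mem_tripsI_iff_occ _ _ _).1 hq
    have hpw := tripsI_pairwise s.toList [] 0
    rw [hT] at hpw
    have hrest : ∀ q' ∈ rest, i₀ < q'.1 := (List.pairwise_cons.1 hpw).1
    have hmin : ∀ c i, (occIdxs c s.toList 0)[2]? = some i → i₀ < i ∨ (i = i₀ ∧ c = c₀) := by
      intro c i h
      have hm := (mem_tripsI_iff_occ s.toList i c).2 h
      rw [hT] at hm
      rcases List.mem_cons.1 hm with heq | hmem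
      · right
        cases heq
        exact ⟨rfl, rfl⟩
      · left
        exact hrest _ hmem
    have hc₀mem : c₀ ∈ PySem.List.dedup s.toList := by
      obtain ⟨j, hj, _, hget, _⟩ := (mem_tripsI s.toList [] 0 i₀ c₀).1 hq
      have : c₀ ∈ s.toList := List.mem_of_getElem? hget
      simpa [PySem.List.mem_dedup] using this
    rw [foldl_bestStep_min s.toList i₀ c₀ hocc hmin _ none hc₀mem (Or.inl rfl)]
    rfl
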